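-- pv_equiv track=rewrite | github.com/vgraeber/hofstracs | csc110/mariecolor.py | bin4ToHex
-- ===== SOURCE A (Python) =====
-- def bin4ToHex(n):
--   decN = 0
--   exp = 0
--   for i in range(len(n) - 1, -1, -1):
--     if (n[i] == 1):
--       decN += (2 ** exp)
--     exp += 1
--   hex = ["0", "1", "2", "3", "4", "5", "6", "7", "8", "9", "A", "B", "C", "D", "E", "F"]
--   hexN = hex[decN]
--   return hexN
-- ===== SOURCE B (Python) =====
-- def bin4ToHex(n):
--   decN = 0
--   for b in n:
--     decN = 2 * decN + (1 if b == 1 else 0)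
--   hex = ["0", "1", "2", "3", "4", "5", "6", "7", "8", "9", "A", "B", "C", "D", "E", "F"]
--   return hex[decN]
-- ===== Notes on version B (the rewrite author's own statement) =====
-- stated objective: simpler
-- what changed: Replaces the reverse index loop that accumulates 2**exp for each set bit with a forward Horner-rule pass (decN = 2*decN + bit), eliminating the exp counter, the power computation and the index arithmetic.
-- outside the precondition, e.g. on bin4ToHex([1, 0, 0, 0, 0]): A raises IndexError, B raises IndexError
import Mathlib
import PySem

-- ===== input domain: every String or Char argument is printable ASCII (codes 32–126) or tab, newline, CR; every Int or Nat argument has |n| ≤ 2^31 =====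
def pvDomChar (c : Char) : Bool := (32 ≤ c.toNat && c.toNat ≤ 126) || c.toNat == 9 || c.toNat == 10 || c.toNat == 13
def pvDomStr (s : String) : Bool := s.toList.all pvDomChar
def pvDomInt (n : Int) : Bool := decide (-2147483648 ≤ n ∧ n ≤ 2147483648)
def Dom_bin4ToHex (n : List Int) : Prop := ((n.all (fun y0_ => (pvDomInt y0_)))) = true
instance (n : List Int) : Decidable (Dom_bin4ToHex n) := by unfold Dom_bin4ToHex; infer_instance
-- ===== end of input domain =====

-- B replaces A's reverse index loop with 2**exp powers by a forward Horner-rule pass (simpler); same hex-table lookup.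


-- ===== PORT A =====
-- the hex digit table both Pythons build literally
def pvHexTable : List String :=
  ["0", "1", "2", "3", "4", "5", "6", "7", "8", "9", "A", "B", "C", "D", "E", "F"]

-- A's loop body: state (decN, exp); 'if n[i] == 1: decN += 2 ** exp; exp += 1'
def aStep (n : List Int) (s : Int × Int) (i : Int) : Int × Int :=
  (if PySem.List.pyGetD n i 0 == 1 then s.1 + 2 ^ s.2.toNat else s.1, s.2 + 1)

def bin4ToHex (n : List Int) : String :=
  let s := (PySem.List.pyRange ((n.length : Int) - 1) (-1) (-1)).foldl (aStep n) (0, 0)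
  PySem.List.pyGetD pvHexTable s.1 ""

-- ===== PORT B =====
def bin4ToHex_alt (n : List Int) : String :=
  let decN := n.foldl (fun a b => 2 * a + (if b == 1 then 1 else 0)) (0 : Int)
  PySem.List.pyGetD pvHexTable decN ""

-- ===== PRECONDITION & SPEC =====
-- Pre_ excludes exactly the inputs where the accumulated value is ≥ 16 (an entry equal to 1
-- earlier than the last four positions), on which Python A's hex[decN] raises IndexError
-- (and Python B raises identically).
def Pre_bin4ToHex (n : List Int) : Prop := ((n.take (n.length - 4)).all (fun x => !(x == 1))) = true
instance (n : List Int) : Decidable (Pre_bin4ToHex n) := by unfold Pre_bin4ToHex; infer_instance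
def pvWitness_bin4ToHex : List Int := [1, 0, 1, 1]
def Spec_bin4ToHex (n : List Int) (out : String) : Prop := out = bin4ToHex_alt n
instance (n : List Int) (out : String) : Decidable (Spec_bin4ToHex n out) := by unfold Spec_bin4ToHex; infer_instance

-- ===== CLAIM (what is proved, stated in full; the proofs are below) =====
def Claim_equal_bin4ToHex : Prop := ∀ (n : List Int), Dom_bin4ToHex n → Pre_bin4ToHex n → Spec_bin4ToHex n (bin4ToHex n)

-- ===== LEMMAS AND PROOFS =====

-- B's accumulator (Horner value), as a named function for the proofs
def hornZ (m : List Int) : Int := m.foldl (fun a b => 2 * a + (if b == 1 then 1 else 0)) 0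

lemma hornZ_append (rs : List Int) (x : Int) :
    hornZ (rs ++ [x]) = 2 * hornZ rs + (if x == 1 then 1 else 0) := by
  simp [hornZ, List.foldl_append]

lemma foldl_congr_on {α β : Type} (l : List β) :
    ∀ (f g : α → β → α), (∀ i ∈ l, ∀ s, f s i = g s i) → ∀ s, l.foldl f s = l.foldl g s := by
  induction l with
  | nil => intro f g _ s; rfl
  | cons a t ih =>
      intro f g h s
      simp only [List.foldl_cons]
      rw [h a (List.mem_cons_self)]
      exact ih f g (fun i hi s' => h i (List.mem_cons_of_mem _ hi) s') _

-- A's loop over indices < rs.length reads only positions of rs, so appending x is invisible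
lemma foldl_aStep_append (rs : List Int) (x : Int) (b : Int) (hb : b < (rs.length : Int))
    (s : Int × Int) :
    (PySem.List.pyRange b (-1) (-1)).foldl (aStep (rs ++ [x])) s
      = (PySem.List.pyRange b (-1) (-1)).foldl (aStep rs) s := by
  refine foldl_congr_on _ _ _ ?_ s
  intro i hi s'
  have hmem := (PySem.List.mem_pyRange_neg_one (a := b) (b := -1) (x := i)).1 hi
  obtain ⟨k, rfl⟩ : ∃ k : ℕ, i = (k : Int) := ⟨i.toNat, by omega⟩
  have hk : k < rs.length := by omega
  unfold aStep
  simp [List.getD, List.getElem?_append_left hk]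

-- main invariant: A's reverse-index loop computes the Horner value shifted by 2^e
lemma aLoop_spec (m : List Int) : ∀ (d : Int) (e : ℕ),
    (PySem.List.pyRange ((m.length : Int) - 1) (-1) (-1)).foldl (aStep m) (d, (e : Int))
      = (d + 2 ^ e * hornZ m, (e : Int) + m.length) := by
  induction m using List.reverseRecOn with
  | nil =>
      intro d e
      rw [PySem.List.pyRange_neg_one_eq_nil (by norm_num)]
      simp [hornZ]
  | append_singleton rs x ih =>
      intro d e
      have hL : ((rs.length : Int) + 1 - 1) = (rs.length : Int) := by ring
      have hcons := PySem.List.pyRange_neg_one_cons (a := (rs.length : Int)) (b := -1) (by omega)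
      simp only [List.length_append, List.length_singleton, Nat.cast_add, Nat.cast_one, hL]
      rw [hcons, List.foldl_cons]
      have hget : PySem.List.pyGetD (rs ++ [x]) ((rs.length : Int)) 0 = x := by
        simp [List.getD]
      have hstep : aStep (rs ++ [x]) (d, (e : Int)) (rs.length : Int)
          = (d + 2 ^ e * (if x == 1 then 1 else 0), (e : Int) + 1) := by
        unfold aStep
        rw [hget]
        by_cases hx : x == 1 <;> simp [hx]
      rw [hstep]
      rw [foldl_aStep_append rs x _ (by omega)]
      have he1 : ((e : Int) + 1) = ((e + 1 : ℕ) : Int) := by push_cast; ring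
      rw [he1, ih (d + 2 ^ e * (if x == 1 then 1 else 0)) (e + 1)]
      rw [hornZ_append]
      simp only [Prod.mk.injEq]
      constructor
      · rw [pow_succ]; ring
      · push_cast; ring

-- ===== VERDICT (by name: the statement is the Claim_ definition above) =====
theorem bin4ToHex_spec : Claim_equal_bin4ToHex := by
  intro n _ _
  unfold Spec_bin4ToHex bin4ToHex bin4ToHex_alt
  have h := aLoop_spec n 0 0
  simp only [Nat.cast_zero] at h
  simp only [h]
  norm_num [hornZ]
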